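-- pv_equiv track=rewrite | github.com/pypi-data/pypi-mirror-84 | packages/util-ds/util_ds-0.5.1.tar.gz/util_ds-0.5.1/util_ds/nlp/word_token.py | brace_reversed
-- ===== SOURCE A (Python) =====
-- def brace_reversed(list_word, dic):
--     result = []
--
--     start = 0
--     for idx, item in enumerate(list_word):
--         if item == "REPLACE":
--             start = 1
--         elif start == 1:
--             word_index = int(item)
--             result.append(dic[word_index])
--             start = 0
--         else:
--             result.append(item)
--     return result
-- ===== SOURCE B (Python) =====
-- def brace_reversed(list_word, dic):
--     result = []
--     it = iter(list_word)
--     for item in it: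
--         if item != "REPLACE":
--             result.append(item)
--             continue
--         nxt = item
--         try:
--             while nxt == "REPLACE":
--                 nxt = next(it)
--         except StopIteration:
--             break
--         result.append(dic[int(nxt)])
--     return result
-- ===== Notes on version B (the rewrite author's own statement) =====
-- stated objective: alternative
-- what changed: Replaces the start-flag state machine with consume-ahead iteration: on seeing 'REPLACE' an inner loop advances the iterator past any further 'REPLACE' tokens and converts the next token, so no flag is carried between loop steps.
import Mathlib
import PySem

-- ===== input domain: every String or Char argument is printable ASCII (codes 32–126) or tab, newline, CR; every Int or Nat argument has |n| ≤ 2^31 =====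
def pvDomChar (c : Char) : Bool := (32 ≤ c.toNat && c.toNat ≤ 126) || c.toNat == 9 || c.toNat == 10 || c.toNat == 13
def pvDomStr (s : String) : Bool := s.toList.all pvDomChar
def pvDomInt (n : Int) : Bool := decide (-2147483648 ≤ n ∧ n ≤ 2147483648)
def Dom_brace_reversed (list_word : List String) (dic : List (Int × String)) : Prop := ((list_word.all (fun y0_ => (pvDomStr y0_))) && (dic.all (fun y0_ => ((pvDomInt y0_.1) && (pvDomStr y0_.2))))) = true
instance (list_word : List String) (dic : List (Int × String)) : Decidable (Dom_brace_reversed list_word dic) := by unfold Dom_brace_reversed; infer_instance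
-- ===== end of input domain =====

-- B replaces A's start-flag state machine by consume-ahead iteration (an inner skip loop over the same
-- traversal); same cost, different decomposition. Equivalence is over the return value on Pre_.

-- dic[int(item)]: under Pre_ the parse succeeds and the key is present, so the getD defaults are never used.
def pvConv (dic : List (Int × String)) (item : String) : String :=
  (dic.lookup ((PySem.Int.ofStr? item).getD 0)).getD ""

-- ===== PORT A =====
def brace_reversed (list_word : List String) (dic : List (Int × String)) : List String :=
  (list_word.foldl
    (fun (st : List String × Int) item =>
      if item == "REPLACE" then (st.1, (1 : Int))
      else if st.2 == 1 then (st.1 ++ [pvConv dic item], (0 : Int))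
      else (st.1 ++ [item], st.2))
    (([] : List String), (0 : Int))).1

-- ===== PORT B =====
mutual
-- the outer 'for item in it' loop of B
def pvGo (dic : List (Int × String)) : List String → List String
  | [] => []
  | item :: rest =>
    if item == "REPLACE" then pvSkip dic rest
    else item :: pvGo dic rest
-- B's inner 'while nxt == "REPLACE": nxt = next(it)' loop; [] = StopIteration → break
def pvSkip (dic : List (Int × String)) : List String → List String
  | [] => []
  | nxt :: rest =>
    if nxt == "REPLACE" then pvSkip dic rest
    else pvConv dic nxt :: pvGo dic rest
end

def brace_reversed_alt (list_word : List String) (dic : List (Int × String)) : List String :=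
  pvGo dic list_word

-- ===== PRECONDITION & SPEC =====
-- Pre_ excludes exactly the inputs where Python A raises: a token right after a "REPLACE" that
-- int() cannot parse (ValueError) or whose value is not a key of dic (KeyError).
def Pre_brace_reversed (list_word : List String) (dic : List (Int × String)) : Prop :=
  ∀ p ∈ list_word.zip list_word.tail,
    p.1 = "REPLACE" → p.2 ≠ "REPLACE" →
      (PySem.Int.ofStr? p.2).isSome ∧ (dic.lookup ((PySem.Int.ofStr? p.2).getD 0)).isSome
instance (list_word : List String) (dic : List (Int × String)) : Decidable (Pre_brace_reversed list_word dic) := by unfold Pre_brace_reversed; infer_instance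

def pvWitness_brace_reversed : List String × (List (Int × String)) :=
  (["a", "REPLACE", "0", "b", "REPLACE", "REPLACE", "1"], [(0, "zero"), (1, "one")])

def Spec_brace_reversed (list_word : List String) (dic : List (Int × String)) (out : List String) : Prop := out = brace_reversed_alt list_word dic
instance (list_word : List String) (dic : List (Int × String)) (out : List String) : Decidable (Spec_brace_reversed list_word dic out) := by unfold Spec_brace_reversed; infer_instance

-- ===== CLAIM (what is proved, stated in full; the proofs are below) =====
def Claim_equal_brace_reversed : Prop := ∀ (list_word : List String) (dic : List (Int × String)), Dom_brace_reversed list_word dic → Pre_brace_reversed list_word dic → Spec_brace_reversed list_word dic (brace_reversed list_word dic)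

-- ===== LEMMAS AND PROOFS =====

-- A's flag states 0/1 correspond to B's two loop modes pvGo/pvSkip.
theorem pvFold_go_skip (dic : List (Int × String)) (l : List String) :
    ∀ acc : List String,
      ((l.foldl
        (fun (st : List String × Int) item =>
          if item == "REPLACE" then (st.1, (1 : Int))
          else if st.2 == 1 then (st.1 ++ [pvConv dic item], (0 : Int))
          else (st.1 ++ [item], st.2))
        (acc, (0 : Int))).1 = acc ++ pvGo dic l)
      ∧ ((l.foldl
        (fun (st : List String × Int) item =>
          if item == "REPLACE" then (st.1, (1 : Int))
          else if st.2 == 1 then (st.1 ++ [pvConv dic item], (0 : Int))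
          else (st.1 ++ [item], st.2))
        (acc, (1 : Int))).1 = acc ++ pvSkip dic l) := by
  induction l with
  | nil => intro acc; simp [pvGo, pvSkip]
  | cons x rest ih =>
    intro acc
    constructor
    · by_cases hx : x = "REPLACE"
      · simpa [hx, pvGo] using (ih acc).2
      · simpa [List.foldl_cons, hx, pvGo] using (ih (acc ++ [x])).1
    · by_cases hx : x = "REPLACE"
      · simpa [hx, pvSkip] using (ih acc).2
      · simpa [List.foldl_cons, hx, pvSkip] using (ih (acc ++ [pvConv dic x])).1

-- ===== VERDICT (by name: the statement is the Claim_ definition above) =====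
theorem brace_reversed_spec : Claim_equal_brace_reversed := by
  intro list_word dic _ _
  unfold Spec_brace_reversed brace_reversed brace_reversed_alt
  simpa using (pvFold_go_skip dic list_word []).1
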